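-- pv_equiv track=rewrite | github.com/ansible/ansible | lib/ansible/module_utils/network/onyx/onyx.py | _parse_json_output
-- ===== SOURCE A (Python) =====
-- def _parse_json_output(out):
--     out_list = out.split('\n')
--     first_index = 0
--     opening_char = None
--     lines_count = len(out_list)
--     while first_index < lines_count:
--         first_line = out_list[first_index].strip()
--         if not first_line or first_line[0] not in ("[", "{"):
--             first_index += 1
--             continue
--         opening_char = first_line[0]
--         break
--     if not opening_char:
--         return "null"
--     closing_char = ']' if opening_char == '[' else '}'
--     last_index = lines_count - 1
--     found = False
--     while last_index > first_index:
--         last_line = out_list[last_index].strip()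
--         if not last_line or last_line[0] != closing_char:
--             last_index -= 1
--             continue
--         found = True
--         break
--     if not found:
--         return opening_char + closing_char
--     return "".join(out_list[first_index:last_index + 1])
-- ===== SOURCE B (Python) =====
-- def _parse_json_output(out):
--     lines = out.split('\n')
--     first_index = None
--     opening_char = None
--     closing_char = None
--     last_index = None
--     for i, line in enumerate(lines):
--         s = line.strip()
--         if not s:
--             continue
--         if opening_char is None:
--             if s[0] in ('[', '{'):
--                 first_index = i
--                 opening_char = s[0]
--                 closing_char = ']' if s[0] == '[' else '}'
--         elif s[0] == closing_char:
--             last_index = i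
--     if opening_char is None:
--         return "null"
--     if last_index is None:
--         return opening_char + closing_char
--     return "".join(lines[first_index:last_index + 1])
-- ===== Notes on version B (the rewrite author's own statement) =====
-- stated objective: alternative
-- what changed: Replaces A's two index-driven while loops (a forward scan for the opening line plus a separate backward scan for the closing line) by one forward pass over the lines that records the opening line when first seen and keeps updating the index of the last matching closing line.
import Mathlib
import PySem

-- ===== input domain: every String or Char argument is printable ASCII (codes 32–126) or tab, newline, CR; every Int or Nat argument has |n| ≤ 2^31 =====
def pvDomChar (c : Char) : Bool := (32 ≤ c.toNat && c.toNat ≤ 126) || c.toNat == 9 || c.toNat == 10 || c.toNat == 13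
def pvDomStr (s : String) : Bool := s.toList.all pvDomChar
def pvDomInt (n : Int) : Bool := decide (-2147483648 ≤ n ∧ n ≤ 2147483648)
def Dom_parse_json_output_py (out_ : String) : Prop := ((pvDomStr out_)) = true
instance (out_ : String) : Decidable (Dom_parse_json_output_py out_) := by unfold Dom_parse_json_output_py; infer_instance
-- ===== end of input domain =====

-- B replaces A's forward-then-backward pair of index loops by a single forward pass
-- recording the opening line and the last matching closing line (objective: alternative).


-- ===== PORT A =====
-- A's first while loop: scan forward for the first line whose stripped first char is '[' or '{'.
def pvA_firstLoop : List String → Nat → Option (Nat × Char)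
  | [], _ => none
  | l :: rest, i =>
    let s := (PySem.Str.strip l).toList
    if s = [] ∨ (s.headD ' ' ≠ '[' ∧ s.headD ' ' ≠ '{') then
      pvA_firstLoop rest (i + 1)
    else some (i, s.headD ' ')

-- A's second while loop: scan backward from len-1 down to first_index+1 for a line whose
-- stripped first char is the closing char.  out_list[last_index] is always in range there,
-- so getD "" is exact for Python's out_list[last_index].
def pvA_lastLoop (lines : List String) (closing : Char) (fi : Nat) : Nat → Option Nat
  | 0 => none
  | j + 1 =>
    if fi < j + 1 then
      let s := (PySem.Str.strip (lines.getD (j + 1) "")).toList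
      if s = [] ∨ s.headD ' ' ≠ closing then pvA_lastLoop lines closing fi j
      else some (j + 1)
    else none

def parse_json_output_py (out_ : String) : String :=
  let out_list := (PySem.Str.split? out_ "\n").getD []  -- sep "\n" ≠ "", so split? is some: exact for out.split('\n')
  match pvA_firstLoop out_list 0 with
  | none => "null"
  | some (fi, oc) =>
    let closing := if oc = '[' then ']' else '}'
    match pvA_lastLoop out_list closing fi (out_list.length - 1) with
    | none => String.ofList [oc, closing]
    | some li => PySem.Str.join "" (PySem.List.slice out_list (some (fi : Int)) (some ((li : Int) + 1)))

-- ===== PORT B =====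
-- B's single forward pass: state = (first opening line index+char+closing char, last closing index).
def pvB_loop : List String → Nat → Option (Nat × Char × Char) → Option Nat → (Option (Nat × Char × Char) × Option Nat)
  | [], _, first, last => (first, last)
  | l :: rest, i, first, last =>
    let s := (PySem.Str.strip l).toList
    if s = [] then pvB_loop rest (i + 1) first last
    else match first with
      | none =>
        if s.headD ' ' = '[' ∨ s.headD ' ' = '{' then
          pvB_loop rest (i + 1) (some (i, s.headD ' ', if s.headD ' ' = '[' then ']' else '}')) last
        else pvB_loop rest (i + 1) none last
      | some (fi, oc, cc) =>
        if s.headD ' ' = cc then pvB_loop rest (i + 1) (some (fi, oc, cc)) (some i)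
        else pvB_loop rest (i + 1) (some (fi, oc, cc)) last

def parse_json_output_py_alt (out_ : String) : String :=
  let lines := (PySem.Str.split? out_ "\n").getD []  -- sep "\n" ≠ "", so split? is some: exact for out.split('\n')
  match pvB_loop lines 0 none none with
  | (none, _) => "null"
  | (some (fi, oc, cc), last) =>
    match last with
    | none => String.ofList [oc, cc]
    | some li => PySem.Str.join "" (PySem.List.slice lines (some (fi : Int)) (some ((li : Int) + 1)))

-- ===== PRECONDITION & SPEC =====
def Spec_parse_json_output_py (out_ : String) (out : String) : Prop := out = parse_json_output_py_alt out_
instance (out_ : String) (out : String) : Decidable (Spec_parse_json_output_py out_ out) := by unfold Spec_parse_json_output_py; infer_instance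

-- ===== CLAIM (what is proved, stated in full; the proofs are below) =====
def Claim_equal_parse_json_output_py : Prop := ∀ (out_ : String), Dom_parse_json_output_py out_ → Spec_parse_json_output_py out_ (parse_json_output_py out_)

-- ===== LEMMAS AND PROOFS =====

set_option maxHeartbeats 1000000

-- Does a line's stripped text start with the char c?
def pvClose (c : Char) (l : String) : Bool :=
  !((PySem.Str.strip l).toList.isEmpty) && ((PySem.Str.strip l).toList.headD ' ' == c)

lemma pvClose_true {c : Char} {l : String}
    (h1 : (PySem.Str.strip l).toList ≠ []) (h2 : (PySem.Str.strip l).toList.headD ' ' = c) :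
    pvClose c l = true := by
  simp only [pvClose, Bool.and_eq_true, Bool.not_eq_true', List.isEmpty_eq_false_iff, beq_iff_eq]
  exact ⟨h1, h2⟩

lemma pvClose_false_of_empty {c : Char} {l : String}
    (h1 : (PySem.Str.strip l).toList = []) : pvClose c l = false := by
  simp only [pvClose, h1, List.isEmpty_nil, Bool.not_true, Bool.false_and]

lemma pvClose_false_of_head {c : Char} {l : String}
    (h2 : (PySem.Str.strip l).toList.headD ' ' ≠ c) : pvClose c l = false := by
  simp only [pvClose, Bool.and_eq_false_iff, beq_eq_false_iff_ne, ne_eq]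
  exact Or.inr h2

-- Index of the LAST line matching pvClose, relative to the list.
def pvLastMatch (c : Char) : List String → Option Nat
  | [] => none
  | l :: t =>
    match pvLastMatch c t with
    | some k => some (k + 1)
    | none => if pvClose c l then some 0 else none

lemma pvLastMatch_append_single (c : Char) (t : List String) (x : String) :
    pvLastMatch c (t ++ [x]) = if pvClose c x then some t.length else pvLastMatch c t := by
  induction t with
  | nil => cases hcx : pvClose c x <;> simp [pvLastMatch, hcx]
  | cons a t ih =>
    simp only [List.cons_append, pvLastMatch, ih]
    cases hcx : pvClose c x <;> simp [hcx]

lemma pvB_loop_phase2 (t : List String) : ∀ (i fi : Nat) (oc cc : Char) (acc : Option Nat),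
    pvB_loop t i (some (fi, oc, cc)) acc =
      (some (fi, oc, cc),
        match pvLastMatch cc t with
        | some k => some (i + k)
        | none => acc) := by
  induction t with
  | nil => intro i fi oc cc acc; rfl
  | cons l t ih =>
    intro i fi oc cc acc
    simp only [pvB_loop]
    by_cases he : (PySem.Str.strip l).toList = []
    · rw [if_pos he, ih, pvLastMatch, pvClose_false_of_empty he]
      cases pvLastMatch cc t
      · rfl
      · dsimp only
        rw [Nat.add_assoc, Nat.add_comm 1]
    · rw [if_neg he]
      by_cases hh : (PySem.Str.strip l).toList.headD ' ' = cc
      · rw [if_pos hh, ih, pvLastMatch, pvClose_true he hh]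
        cases pvLastMatch cc t
        · rfl
        · dsimp only
          rw [Nat.add_assoc, Nat.add_comm 1]
      · rw [if_neg hh, ih, pvLastMatch, pvClose_false_of_head hh]
        cases pvLastMatch cc t
        · rfl
        · dsimp only
          rw [Nat.add_assoc, Nat.add_comm 1]

lemma pvA_lastLoop_append (l ext : List String) (c : Char) (fi : Nat) :
    ∀ j, j < l.length → pvA_lastLoop (l ++ ext) c fi j = pvA_lastLoop l c fi j := by
  intro j
  induction j with
  | zero => intro _; rfl
  | succ j ih =>
    intro hj
    have hget : (l ++ ext).getD (j + 1) "" = l.getD (j + 1) "" := by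
      simp only [List.getD_eq_getElem?_getD, List.getElem?_append_left hj]
    simp only [pvA_lastLoop, hget]
    by_cases hfi : fi < j + 1
    · rw [if_pos hfi, if_pos hfi]
      split
      · exact ih (by omega)
      · rfl
    · rw [if_neg hfi, if_neg hfi]

-- A's backward scan over pre ++ l0 :: suf (fi = |pre|) finds exactly the last pvClose line of suf.
lemma pvA_lastLoop_eq (c : Char) (suf : List String) : ∀ (pre : List String) (l0 : String),
    pvA_lastLoop (pre ++ l0 :: suf) c pre.length (pre.length + suf.length) =
      (match pvLastMatch c suf with
       | some k => some (pre.length + 1 + k)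
       | none => none) := by
  induction suf using List.reverseRecOn with
  | nil =>
    intro pre l0
    cases h : pre.length with
    | zero => rfl
    | succ m =>
      simp only [List.length_nil, Nat.add_zero, h, pvA_lastLoop, pvLastMatch]
      rw [if_neg (by omega)]
  | append_singleton suf x ih =>
    intro pre l0
    have hidx : pre.length + (suf ++ [x]).length = (pre.length + suf.length) + 1 := by
      simp only [List.length_append, List.length_cons, List.length_nil]; omega
    have hget : (pre ++ l0 :: (suf ++ [x])).getD (pre.length + suf.length + 1) "" = x := by
      have hr : pre ++ l0 :: (suf ++ [x]) = (pre ++ l0 :: suf) ++ [x] := by simp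
      rw [hr, List.getD_eq_getElem?_getD,
        List.getElem?_append_right (by simp only [List.length_append, List.length_cons]; omega)]
      simp only [List.length_append, List.length_cons]
      have : pre.length + suf.length + 1 - (pre.length + (suf.length + 1)) = 0 := by omega
      rw [this]
      rfl
    rw [hidx]
    simp only [pvA_lastLoop, hget]
    rw [if_pos (by omega), pvLastMatch_append_single]
    by_cases hxe : (PySem.Str.strip x).toList = []
    · rw [if_pos (Or.inl hxe), pvClose_false_of_empty hxe, if_neg (Bool.false_ne_true)]
      have hrw : pre ++ l0 :: (suf ++ [x]) = (pre ++ l0 :: suf) ++ [x] := by simp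
      rw [hrw, pvA_lastLoop_append _ _ _ _ _
        (by simp only [List.length_append, List.length_cons]; omega), ih pre l0]
    · by_cases hxh : (PySem.Str.strip x).toList.headD ' ' = c
      · rw [if_neg (by rw [not_or, not_not]; exact ⟨hxe, hxh⟩), pvClose_true hxe hxh,
          if_pos rfl]
        dsimp only
        congr 1
        omega
      · rw [if_pos (Or.inr hxh), pvClose_false_of_head hxh, if_neg (Bool.false_ne_true)]
        have hrw : pre ++ l0 :: (suf ++ [x]) = (pre ++ l0 :: suf) ++ [x] := by simp
        rw [hrw, pvA_lastLoop_append _ _ _ _ _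
          (by simp only [List.length_append, List.length_cons]; omega), ih pre l0]

lemma pvA_firstLoop_bounds : ∀ (l : List String) (i fi : Nat) (oc : Char),
    pvA_firstLoop l i = some (fi, oc) → i ≤ fi ∧ fi < i + l.length := by
  intro l
  induction l with
  | nil => intro i fi oc h; exact absurd h (by simp [pvA_firstLoop])
  | cons a t ih =>
    intro i fi oc h
    simp only [pvA_firstLoop] at h
    split at h
    · have := ih (i + 1) fi oc h
      simp only [List.length_cons]
      omega
    · simp only [Option.some.injEq, Prod.mk.injEq] at h
      obtain ⟨rfl, rfl⟩ := h
      simp only [List.length_cons]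
      omega

-- The first phase of B's pass agrees with A's forward scan, then hands over to phase 2.
lemma pvB_loop_phase1 : ∀ (l : List String) (i : Nat),
    pvB_loop l i none none =
      (match pvA_firstLoop l i with
       | none => (none, none)
       | some (fi, oc) =>
          (some (fi, oc, if oc = '[' then ']' else '}'),
            match pvLastMatch (if oc = '[' then ']' else '}') (l.drop (fi + 1 - i)) with
            | some k => some (fi + 1 + k)
            | none => none)) := by
  intro l
  induction l with
  | nil => intro i; rfl
  | cons a t ih =>
    intro i
    by_cases he : (PySem.Str.strip a).toList = []
    · have hA : pvA_firstLoop (a :: t) i = pvA_firstLoop t (i + 1) := by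
        simp only [pvA_firstLoop]
        rw [if_pos (Or.inl he)]
      rw [hA]
      simp only [pvB_loop]
      rw [if_pos he, ih (i + 1)]
      cases h : pvA_firstLoop t (i + 1) with
      | none => rfl
      | some p =>
        obtain ⟨fi, oc⟩ := p
        have hb := pvA_firstLoop_bounds t (i + 1) fi oc h
        have hdrop : (a :: t).drop (fi + 1 - i) = t.drop (fi + 1 - (i + 1)) := by
          have h1 : fi + 1 - i = (fi + 1 - (i + 1)) + 1 := by omega
          rw [h1, List.drop_succ_cons]
        dsimp only
        rw [hdrop]
    · by_cases hh : (PySem.Str.strip a).toList.headD ' ' = '[' ∨ (PySem.Str.strip a).toList.headD ' ' = '{'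
      · have hA : pvA_firstLoop (a :: t) i = some (i, (PySem.Str.strip a).toList.headD ' ') := by
          simp only [pvA_firstLoop]
          rw [if_neg]
          push_neg
          exact ⟨he, fun h1 => hh.resolve_left h1⟩
        rw [hA]
        simp only [pvB_loop]
        rw [if_neg he, if_pos hh, pvB_loop_phase2]
        have hdrop : (a :: t).drop (i + 1 - i) = t := by
          have h1 : i + 1 - i = 1 := by omega
          rw [h1, List.drop_succ_cons, List.drop_zero]
        rw [hdrop]
      · have hA : pvA_firstLoop (a :: t) i = pvA_firstLoop t (i + 1) := by
          simp only [pvA_firstLoop]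
          rw [if_pos (Or.inr ⟨fun h1 => hh (Or.inl h1), fun h2 => hh (Or.inr h2)⟩)]
        rw [hA]
        simp only [pvB_loop]
        rw [if_neg he, if_neg hh, ih (i + 1)]
        cases h : pvA_firstLoop t (i + 1) with
        | none => rfl
        | some p =>
          obtain ⟨fi, oc⟩ := p
          have hb := pvA_firstLoop_bounds t (i + 1) fi oc h
          have hdrop : (a :: t).drop (fi + 1 - i) = t.drop (fi + 1 - (i + 1)) := by
            have h1 : fi + 1 - i = (fi + 1 - (i + 1)) + 1 := by omega
            rw [h1, List.drop_succ_cons]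
          dsimp only
          rw [hdrop]

-- ===== VERDICT (by name: the statement is the Claim_ definition above) =====
theorem parse_json_output_py_spec : Claim_equal_parse_json_output_py := by
  intro out_ _
  unfold Spec_parse_json_output_py
  simp only [parse_json_output_py, parse_json_output_py_alt]
  set lines := (PySem.Str.split? out_ "\n").getD [] with hlines
  rw [pvB_loop_phase1 lines 0]
  cases hf : pvA_firstLoop lines 0 with
  | none => rfl
  | some p =>
    obtain ⟨fi, oc⟩ := p
    have hb := pvA_firstLoop_bounds lines 0 fi oc hf
    have hfi : fi < lines.length := by omega
    have hdec : lines.take fi ++ lines[fi] :: lines.drop (fi + 1) = lines := by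
      rw [List.getElem_cons_drop, List.take_append_drop]
    have hlen : (lines.take fi).length = fi := by
      simp only [List.length_take]
      omega
    have hlast : pvA_lastLoop lines (if oc = '[' then ']' else '}') fi (lines.length - 1) =
        (match pvLastMatch (if oc = '[' then ']' else '}') (lines.drop (fi + 1)) with
         | some k => some (fi + 1 + k)
         | none => none) := by
      have h := pvA_lastLoop_eq (if oc = '[' then ']' else '}') (lines.drop (fi + 1))
        (lines.take fi) lines[fi]
      rw [hdec, hlen] at h
      have hl : fi + (lines.drop (fi + 1)).length = lines.length - 1 := by
        simp only [List.length_drop]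
        omega
      rw [hl] at h
      rw [h]
    dsimp only
    rw [Nat.sub_zero, hlast]
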